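-- pv_equiv track=rewrite | github.com/CarlTern/Mix-Ip-Discloser | disclosureAttack.py | excludingPhase
-- ===== SOURCE A (Python) =====
-- def isNoIntersectOtherwise(finalSets, s):
--     for finalSet in finalSets:
--         if(len(finalSet.intersection(s)) is not 0):
--
--             return False
--
--     return True
--
-- def excludingPhase(disjointSets, numberOfPartners, allSets):
--     for s in allSets:
--         for index in range(len(disjointSets)):
--             compareSets = list(disjointSets)
--             compareSets.remove(disjointSets[index])
--             if(s == disjointSets[index]):
--                 continue
--             if(len(s.intersection(disjointSets[index])) is not 0 and isNoIntersectOtherwise(compareSets, s)):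
--                 disjointSets[index] = s.intersection(disjointSets[index])
--
--     return disjointSets
-- ===== SOURCE B (Python) =====
-- def excludingPhase(disjointSets, numberOfPartners, allSets):
--     result = list(disjointSets)
--     for s in allSets:
--         hits = [i for i, d in enumerate(result) if s & d]
--         if len(hits) == 1:
--             i = hits[0]
--             if result[i] != s:
--                 result[i] = s & result[i]
--     return result
-- ===== Notes on version B (the rewrite author's own statement) =====
-- stated objective: simpler
-- what changed: Instead of A's per-index inner loop that rebuilds and scans a copy of disjointSets (remove-first + disjointness re-scan) for every index, B makes one pass per s collecting the list of indices whose set intersects s, and performs the single conditional shrink only when that list has exactly one element.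
import Mathlib
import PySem

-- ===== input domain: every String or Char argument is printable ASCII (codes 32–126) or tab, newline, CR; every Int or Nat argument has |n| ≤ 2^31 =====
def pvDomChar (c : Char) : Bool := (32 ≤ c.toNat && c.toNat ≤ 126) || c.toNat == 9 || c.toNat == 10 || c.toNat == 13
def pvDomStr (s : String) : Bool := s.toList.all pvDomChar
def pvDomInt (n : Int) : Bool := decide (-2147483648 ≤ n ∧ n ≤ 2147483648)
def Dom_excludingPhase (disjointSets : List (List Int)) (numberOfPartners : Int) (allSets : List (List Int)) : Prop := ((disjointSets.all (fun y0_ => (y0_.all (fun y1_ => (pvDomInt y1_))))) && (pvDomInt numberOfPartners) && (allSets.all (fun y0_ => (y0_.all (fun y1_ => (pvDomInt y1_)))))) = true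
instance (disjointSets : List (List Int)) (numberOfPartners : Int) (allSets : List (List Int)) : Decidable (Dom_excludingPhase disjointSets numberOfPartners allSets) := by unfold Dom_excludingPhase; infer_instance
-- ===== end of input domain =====

-- B replaces A's per-s inner index loop (which copies disjointSets, removes one entry and re-scans
-- the copy for every index) by one pass collecting the intersecting indices, then a single
-- conditional shrink on a unique hit; equal RETURN value (Python A mutates disjointSets in place,
-- B builds a fresh list).

-- ===== PORT A =====
-- Python sets are ported as lists of distinct elements (PySem.Set convention).
-- a.intersection(b): the elements of a that are also in b
def interSet (a b : List Int) : List Int := a.filter (fun x => b.contains x)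
-- Python set equality a == b: same elements
def setEq (a b : List Int) : Bool := a.all (fun x => b.contains x) && b.all (fun x => a.contains x)
-- list.remove(x): drop the first element equal (as a set) to x; in A the removed element is
-- taken from the list itself, so Python's ValueError branch (the [] case) is unreachable
def removeFirstSet : List (List Int) → List Int → List (List Int)
  | [], _ => []
  | y :: t, x => if setEq y x then t else y :: removeFirstSet t x
def isNoIntersectOtherwise : List (List Int) → List Int → Bool
  | [], _ => true
  | f :: rest, s => if (interSet f s).length ≠ 0 then false else isNoIntersectOtherwise rest s
-- for index in range(len(disjointSets)): the indices are nonnegative and in range and the list's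
-- length is invariant under the loop body, so List.range/getD/set is exact here
def excludingPhase (disjointSets : List (List Int)) (numberOfPartners : Int) (allSets : List (List Int)) : List (List Int) :=
  allSets.foldl (fun ds s =>
    (List.range ds.length).foldl (fun cur index =>
      let compareSets := removeFirstSet cur (cur.getD index [])
      if setEq s (cur.getD index []) then cur
      else if ((interSet s (cur.getD index [])).length ≠ 0 && isNoIntersectOtherwise compareSets s : Bool) then
        cur.set index (interSet s (cur.getD index []))
      else cur) ds) disjointSets

-- ===== PORT B =====
def excludingPhase_alt (disjointSets : List (List Int)) (numberOfPartners : Int) (allSets : List (List Int)) : List (List Int) :=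
  allSets.foldl (fun res s =>
    let hits := ((PySem.List.enumerate res 0).filter (fun p => !(interSet s p.2).isEmpty)).map (fun p => p.1)
    match hits with
    | [i] =>
      if setEq (PySem.List.pyGetD res i []) s then res
      else PySem.List.pySetD res i (interSet s (PySem.List.pyGetD res i []))
    | _ => res) disjointSets

-- ===== PRECONDITION & SPEC =====
def Spec_excludingPhase (disjointSets : List (List Int)) (numberOfPartners : Int) (allSets : List (List Int)) (out : List (List Int)) : Prop := out = excludingPhase_alt disjointSets numberOfPartners allSets
instance (disjointSets : List (List Int)) (numberOfPartners : Int) (allSets : List (List Int)) (out : List (List Int)) : Decidable (Spec_excludingPhase disjointSets numberOfPartners allSets out) := by unfold Spec_excludingPhase; infer_instance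

-- ===== CLAIM (what is proved, stated in full; the proofs are below) =====
def Claim_equal_excludingPhase : Prop := ∀ (disjointSets : List (List Int)) (numberOfPartners : Int) (allSets : List (List Int)), Dom_excludingPhase disjointSets numberOfPartners allSets → Spec_excludingPhase disjointSets numberOfPartners allSets (excludingPhase disjointSets numberOfPartners allSets)

-- ===== LEMMAS AND PROOFS =====

theorem interSet_eq_nil_iff (a b : List Int) : interSet a b = [] ↔ ∀ x ∈ a, x ∉ b := by
  simp [interSet, List.filter_eq_nil_iff]

theorem interSet_nil_comm (a b : List Int) : interSet a b = [] ↔ interSet b a = [] := by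
  simp only [interSet_eq_nil_iff]
  exact ⟨fun h x hb ha => h x ha hb, fun h x ha hb => h x hb ha⟩

theorem setEq_iff (a b : List Int) : setEq a b = true ↔ ∀ x, x ∈ a ↔ x ∈ b := by
  simp only [setEq, Bool.and_eq_true, List.all_eq_true, List.contains_iff_mem]
  constructor
  · rintro ⟨h1, h2⟩ x; exact ⟨fun hx => h1 x hx, fun hx => h2 x hx⟩
  · intro h; exact ⟨fun x hx => (h x).1 hx, fun x hx => (h x).2 hx⟩

theorem setEq_refl (a : List Int) : setEq a a = true :=
  (setEq_iff a a).2 (fun _ => Iff.rfl)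

theorem setEq_comm (a b : List Int) : setEq a b = setEq b a := by
  by_cases h : setEq a b = true
  · rw [h, Eq.symm ((setEq_iff b a).2 (fun x => ((setEq_iff a b).1 h x).symm))]
  · have h' : ¬ setEq b a = true := fun hba =>
      h ((setEq_iff a b).2 (fun x => ((setEq_iff b a).1 hba x).symm))
    rw [Bool.not_eq_true] at h h'; rw [h, h']

theorem interSet_nil_congr_right (s a b : List Int) (h : setEq a b = true) :
    (interSet s a = []) ↔ (interSet s b = []) := by
  have hm := (setEq_iff a b).1 h
  simp only [interSet_eq_nil_iff]
  exact ⟨fun hh x hx hb => hh x hx ((hm x).2 hb), fun hh x hx ha => hh x hx ((hm x).1 ha)⟩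

-- the hit predicate: s intersects d
def hitP (s d : List Int) : Bool := !(interSet s d).isEmpty

theorem hitP_iff (s d : List Int) : hitP s d = true ↔ interSet s d ≠ [] := by
  simp [hitP, List.isEmpty_iff]

theorem hitP_congr (s a b : List Int) (h : setEq a b = true) : hitP s a = hitP s b := by
  by_cases ha : interSet s a = []
  · have hb := (interSet_nil_congr_right s a b h).1 ha
    simp [hitP, List.isEmpty_iff, ha, hb]
  · have hb : interSet s b ≠ [] := fun hb0 => ha ((interSet_nil_congr_right s a b h).2 hb0)
    have ha' : (interSet s a).isEmpty = false := by
      rw [Bool.eq_false_iff]; simpa [List.isEmpty_iff] using ha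
    have hb' : (interSet s b).isEmpty = false := by
      rw [Bool.eq_false_iff]; simpa [List.isEmpty_iff] using hb
    simp [hitP, ha', hb']

theorem isNoIntersect_iff (L : List (List Int)) (s : List Int) :
    isNoIntersectOtherwise L s = true ↔ ∀ f ∈ L, interSet f s = [] := by
  induction L with
  | nil => simp [isNoIntersectOtherwise]
  | cons f rest ih =>
    simp only [isNoIntersectOtherwise]
    by_cases h : (interSet f s).length ≠ 0
    · rw [if_pos h]
      constructor
      · intro hf; exact absurd hf (by simp)
      · intro hall; exact absurd (List.length_eq_zero_iff.2 (hall f (by simp))) h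
    · rw [if_neg h]
      push_neg at h
      have hf : interSet f s = [] := List.length_eq_zero_iff.1 h
      rw [ih]
      constructor
      · intro hall g hg
        rcases List.mem_cons.1 hg with rfl | hg'
        · exact hf
        · exact hall g hg'
      · intro hall g hg; exact hall g (List.mem_cons_of_mem _ hg)

-- removeFirstSet splits the list around the first set-equal occurrence
theorem removeFirstSet_split (ds : List (List Int)) (x : List Int)
    (h : ∃ y ∈ ds, setEq y x = true) :
    ∃ pre y suf, ds = pre ++ y :: suf ∧ setEq y x = true ∧ removeFirstSet ds x = pre ++ suf := by
  induction ds with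
  | nil => simp at h
  | cons z t ih =>
    by_cases hz : setEq z x = true
    · exact ⟨[], z, t, rfl, hz, by simp [removeFirstSet, hz]⟩
    · have ht : ∃ y ∈ t, setEq y x = true := by
        rcases h with ⟨y, hy, hys⟩
        rcases List.mem_cons.1 hy with rfl | hyt
        · exact absurd hys hz
        · exact ⟨y, hyt, hys⟩
      obtain ⟨pre, y, suf, hds, hys, hrem⟩ := ih ht
      exact ⟨z :: pre, y, suf, by rw [hds]; rfl, hys,
        by simp [removeFirstSet, hz, hrem]⟩

-- an element of the spliced list at a position other than pre.length survives the splice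
theorem splice_getElem_mem (pre suf : List (List Int)) (y : List Int) (p : ℕ)
    (hp : p < (pre ++ y :: suf).length) (hne : p ≠ pre.length) :
    (pre ++ y :: suf)[p] ∈ pre ++ suf := by
  rcases Nat.lt_or_ge p pre.length with hlt | hge
  · rw [List.getElem_append_left hlt]
    exact List.mem_append_left _ (List.getElem_mem hlt)
  · have hgt : pre.length < p := lt_of_le_of_ne hge (fun h => hne h.symm)
    rw [List.getElem_append_right (Nat.le_of_lt hgt)]
    obtain ⟨m, hm⟩ : ∃ m, p - pre.length = m + 1 := ⟨p - pre.length - 1, by omega⟩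
    have hslen : m < suf.length := by
      simp only [List.length_append, List.length_cons] at hp; omega
    simp only [hm, List.getElem_cons_succ]
    exact List.mem_append_right _ (List.getElem_mem hslen)

-- conversely every survivor sits in the spliced list at a position other than pre.length
theorem mem_splice (pre suf : List (List Int)) (y f : List Int) (hf : f ∈ pre ++ suf) :
    ∃ p, ∃ hp : p < (pre ++ y :: suf).length, p ≠ pre.length ∧ (pre ++ y :: suf)[p] = f := by
  rcases List.mem_append.1 hf with hfp | hfs
  · obtain ⟨i, hi, hif⟩ := List.mem_iff_getElem.1 hfp
    refine ⟨i, ?_, by omega, ?_⟩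
    · simp only [List.length_append, List.length_cons]; omega
    · rw [List.getElem_append_left hi]; exact hif
  · obtain ⟨i, hi, hif⟩ := List.mem_iff_getElem.1 hfs
    refine ⟨pre.length + 1 + i, ?_, by omega, ?_⟩
    · simp only [List.length_append, List.length_cons]; omega
    · rw [List.getElem_append_right (by omega)]
      have hidx : pre.length + 1 + i - pre.length = i + 1 := by omega
      simp only [hidx, List.getElem_cons_succ]; exact hif

-- if index k is the only index whose set meets s, the remove-first scan reports no other intersection
theorem isNoIntersect_of_unique (s : List Int) (cur : List (List Int)) (k : ℕ)
    (hk : k < cur.length) (hhit : hitP s (cur.getD k []) = true)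
    (huniq : ∀ j, j < cur.length → j ≠ k → hitP s (cur.getD j []) = false) :
    isNoIntersectOtherwise (removeFirstSet cur (cur.getD k [])) s = true := by
  have hmem : cur.getD k [] ∈ cur := by
    rw [List.getD_eq_getElem _ _ hk]; exact List.getElem_mem hk
  obtain ⟨pre, y, suf, hds, hye, hrem⟩ :=
    removeFirstSet_split cur (cur.getD k []) ⟨cur.getD k [], hmem, setEq_refl _⟩
  have hplen : pre.length < cur.length := by rw [hds]; simp
  have hgy : cur.getD pre.length [] = y := by
    have hb : pre.length < (pre ++ y :: suf).length := by simp
    rw [hds, List.getD_eq_getElem _ _ hb, List.getElem_append_right (le_refl _)]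
    simp
  have hity : hitP s y = true := by rw [hitP_congr s y (cur.getD k []) hye]; exact hhit
  have hpk : pre.length = k := by
    by_contra hne
    have hfalse := huniq pre.length hplen hne
    rw [hgy] at hfalse; rw [hfalse] at hity; cases hity
  rw [hrem, isNoIntersect_iff]
  intro f hf
  by_contra hne
  have hfh : hitP s f = true := (hitP_iff s f).2 (fun h0 => hne ((interSet_nil_comm s f).1 h0))
  obtain ⟨p, hp, hpne, hpf⟩ := mem_splice pre suf y f hf
  have hplt : p < cur.length := by rw [hds]; exact hp
  have hg : cur.getD p [] = f := by
    rw [hds, List.getD_eq_getElem _ _ hp]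
    exact hpf
  have hfalse := huniq p hplt (by rw [hpk] at hpne; exact hpne)
  rw [hg] at hfalse; rw [hfalse] at hfh; cases hfh

-- with two distinct intersecting indices, the remove-first scan always finds another intersection
theorem isNoIntersect_false_of_two (s : List Int) (cur : List (List Int)) (j k1 k2 : ℕ)
    (hj : j < cur.length) (h1 : k1 < cur.length) (h2 : k2 < cur.length) (hne12 : k1 ≠ k2)
    (hh1 : hitP s (cur.getD k1 []) = true) (hh2 : hitP s (cur.getD k2 []) = true) :
    isNoIntersectOtherwise (removeFirstSet cur (cur.getD j [])) s = false := by
  have hmem : cur.getD j [] ∈ cur := by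
    rw [List.getD_eq_getElem _ _ hj]; exact List.getElem_mem hj
  obtain ⟨pre, y, suf, hds, hye, hrem⟩ :=
    removeFirstSet_split cur (cur.getD j []) ⟨cur.getD j [], hmem, setEq_refl _⟩
  rcases eq_or_ne k1 pre.length with hk1p | hk1p
  · -- use k2
    have hk2p : k2 ≠ pre.length := by omega
    have hmem2 : cur.getD k2 [] ∈ pre ++ suf := by
      have h2' : k2 < (pre ++ y :: suf).length := by rw [← hds]; exact h2
      rw [hds, List.getD_eq_getElem _ _ h2']
      exact splice_getElem_mem pre suf y k2 h2' hk2p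
    rw [hrem, Bool.eq_false_iff]
    intro habs
    exact (hitP_iff s _).1 hh2
      ((interSet_nil_comm s (cur.getD k2 [])).2 ((isNoIntersect_iff _ s).1 habs _ hmem2))
  · have hmem1 : cur.getD k1 [] ∈ pre ++ suf := by
      have h1' : k1 < (pre ++ y :: suf).length := by rw [← hds]; exact h1
      rw [hds, List.getD_eq_getElem _ _ h1']
      exact splice_getElem_mem pre suf y k1 h1' hk1p
    rw [hrem, Bool.eq_false_iff]
    intro habs
    exact (hitP_iff s _).1 hh1
      ((interSet_nil_comm s (cur.getD k1 [])).2 ((isNoIntersect_iff _ s).1 habs _ hmem1))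

-- A's loop step (definitionally the body of A's inner loop)
def stepA (s : List Int) (cur : List (List Int)) (index : ℕ) : List (List Int) :=
  let compareSets := removeFirstSet cur (cur.getD index [])
  if setEq s (cur.getD index []) then cur
  else if ((interSet s (cur.getD index [])).length ≠ 0 && isNoIntersectOtherwise compareSets s : Bool) then
    cur.set index (interSet s (cur.getD index []))
  else cur

theorem stepA_noop (s : List Int) (cur : List (List Int)) (j : ℕ)
    (h : hitP s (cur.getD j []) = false) : stepA s cur j = cur := by
  have hnil : interSet s (cur.getD j []) = [] := by
    by_contra hne
    rw [(hitP_iff s _).2 hne] at h; cases h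
  have hL : (interSet s (cur.getD j [])).length = 0 := by rw [hnil]; rfl
  simp only [stepA]
  split_ifs with h1 h2
  · rfl
  · exfalso
    rw [Bool.and_eq_true] at h2
    exact of_decide_eq_true h2.1 hL
  · rfl

theorem stepA_continue (s : List Int) (cur : List (List Int)) (j : ℕ)
    (h : setEq s (cur.getD j []) = true) : stepA s cur j = cur := by
  unfold stepA; rw [if_pos h]

theorem stepA_update (s : List Int) (cur : List (List Int)) (k : ℕ)
    (hhit : hitP s (cur.getD k []) = true)
    (hnoteq : setEq s (cur.getD k []) = false)
    (hiso : isNoIntersectOtherwise (removeFirstSet cur (cur.getD k [])) s = true) :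
    stepA s cur k = cur.set k (interSet s (cur.getD k [])) := by
  have hne : interSet s (cur.getD k []) ≠ [] := (hitP_iff s _).1 hhit
  have hlen : (interSet s (cur.getD k [])).length ≠ 0 :=
    fun h0 => hne (List.length_eq_zero_iff.1 h0)
  simp only [stepA]
  split_ifs with h1 h2
  · exact absurd h1 (by rw [hnoteq]; simp)
  · rfl
  · exact absurd (by rw [Bool.and_eq_true]; exact ⟨decide_eq_true hlen, hiso⟩) h2

theorem foldl_stepA_noop (s : List Int) (cur : List (List Int)) (l : List ℕ)
    (h : ∀ j ∈ l, stepA s cur j = cur) : l.foldl (stepA s) cur = cur := by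
  induction l with
  | nil => rfl
  | cons j t ih =>
    rw [List.foldl_cons, h j (by simp)]
    exact ih (fun j' hj' => h j' (List.mem_cons_of_mem _ hj'))

-- the whole index loop when k is the unique hit and an update fires
theorem foldl_stepA_update (s : List Int) (cur : List (List Int)) (k : ℕ)
    (hk : k < cur.length)
    (hupd : stepA s cur k = cur.set k (interSet s (cur.getD k [])))
    (huniq : ∀ j, j < cur.length → j ≠ k → hitP s (cur.getD j []) = false) :
    (List.range cur.length).foldl (stepA s) cur = cur.set k (interSet s (cur.getD k [])) := by
  have hsplit : List.range cur.length
      = List.range k ++ List.map (fun x => k + x) (List.range (cur.length - k)) := by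
    rw [← List.range_add]; congr 1; omega
  rw [hsplit, List.foldl_append]
  rw [foldl_stepA_noop s cur _ (fun j hj => stepA_noop s cur j
    (huniq j (by have := List.mem_range.1 hj; omega) (by have := List.mem_range.1 hj; omega)))]
  have hck : cur.length - k = (cur.length - k - 1) + 1 := by omega
  rw [hck, List.range_succ_eq_map, List.map_cons, List.foldl_cons]
  simp only [Nat.add_zero]
  rw [hupd]
  apply foldl_stepA_noop
  intro j hj
  simp only [List.map_map, List.mem_map, List.mem_range] at hj
  obtain ⟨m, hm, rfl⟩ := hj
  apply stepA_noop
  have hjne : k + Nat.succ m ≠ k := by omega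
  have : (cur.set k (interSet s (cur.getD k []))).getD (k + Nat.succ m) []
      = cur.getD (k + Nat.succ m) [] := by
    rw [List.getD_eq_getElem?_getD, List.getElem?_set_ne (fun h => hjne h.symm),
      ← List.getD_eq_getElem?_getD]
  rw [Function.comp_def, this]
  exact huniq _ (by omega) hjne

-- the Nat-indexed hit list
def hitsN (s : List Int) (res : List (List Int)) : List ℕ :=
  (List.range res.length).filter (fun k => hitP s (res.getD k []))

theorem mem_hitsN (s : List Int) (res : List (List Int)) (k : ℕ) :
    k ∈ hitsN s res ↔ k < res.length ∧ hitP s (res.getD k []) = true := by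
  simp [hitsN, List.mem_filter]

theorem nodup_hitsN (s : List Int) (res : List (List Int)) : (hitsN s res).Nodup :=
  List.Nodup.filter _ List.nodup_range

-- B's hit list is the Nat hit list, cast to Int
theorem enum_filter_map (s : List Int) (res : List (List Int)) (a : Int) :
    ((PySem.List.enumerate res a).filter (fun p => !(interSet s p.2).isEmpty)).map (fun p => p.1)
      = ((List.range res.length).filter (fun k => !(interSet s (res.getD k [])).isEmpty)).map (fun (k : Nat) => a + (k : Int)) := by
  induction res generalizing a with
  | nil => simp [PySem.List.enumerate_nil]
  | cons d t ih =>
    have hR : List.range (d :: t).length = 0 :: (List.range t.length).map Nat.succ := by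
      rw [List.length_cons, List.range_succ_eq_map]
    rw [PySem.List.enumerate_cons, hR]
    simp only [List.filter_cons, List.filter_map, List.getD_cons_zero, List.getD_cons_succ,
      Function.comp_def]
    split_ifs with hd
    · rw [List.map_cons, ih (a + 1), List.map_cons, List.map_map]
      congr 1
      · simp
      · apply List.map_congr_left
        intro k _
        simp only [Function.comp_def]
        push_cast; ring
    · rw [ih (a + 1), List.map_map]
      apply List.map_congr_left
      intro k _
      simp only [Function.comp_def]
      push_cast; ring

theorem hitsB_eq (s : List Int) (res : List (List Int)) :
    ((PySem.List.enumerate res 0).filter (fun p => !(interSet s p.2).isEmpty)).map (fun p => p.1)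
      = (hitsN s res).map (fun (k : Nat) => (k : Int)) := by
  rw [enum_filter_map s res 0]
  unfold hitsN
  simp only [hitP]
  apply List.map_congr_left
  intro k _
  simp

-- A's inner pass equals B's single conditional update
theorem inner_eq (s : List Int) (cur : List (List Int)) :
    (List.range cur.length).foldl (stepA s) cur
      = (match ((PySem.List.enumerate cur 0).filter (fun p => !(interSet s p.2).isEmpty)).map (fun p => p.1) with
          | [i] =>
            if setEq (PySem.List.pyGetD cur i []) s then cur
            else PySem.List.pySetD cur i (interSet s (PySem.List.pyGetD cur i []))
          | _ => cur) := by
  rcases hH : hitsN s cur with _ | ⟨k1, _ | ⟨k2, rest⟩⟩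
  · -- no hit: every step is a no-op
    rw [hitsB_eq s cur, hH]
    exact foldl_stepA_noop s cur _ (fun j hj => stepA_noop s cur j (by
      by_contra hb
      rw [Bool.not_eq_false] at hb
      have : j ∈ hitsN s cur := (mem_hitsN s cur j).2 ⟨List.mem_range.1 hj, hb⟩
      rw [hH] at this; cases this))
  · -- unique hit k1
    have hk1 : k1 < cur.length ∧ hitP s (cur.getD k1 []) = true :=
      (mem_hitsN s cur k1).1 (by rw [hH]; exact List.mem_cons_self)
    have huniq : ∀ j, j < cur.length → j ≠ k1 → hitP s (cur.getD j []) = false := by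
      intro j hj hjne
      by_contra hb
      rw [Bool.not_eq_false] at hb
      have : j ∈ hitsN s cur := (mem_hitsN s cur j).2 ⟨hj, hb⟩
      rw [hH] at this
      exact hjne (List.mem_singleton.1 this)
    rw [hitsB_eq s cur, hH]
    show (List.range cur.length).foldl (stepA s) cur =
      if setEq (PySem.List.pyGetD cur ((k1 : Int)) []) s = true then cur
      else PySem.List.pySetD cur ((k1 : Int)) (interSet s (PySem.List.pyGetD cur ((k1 : Int)) []))
    rw [PySem.List.pyGetD_natCast, PySem.List.pySetD_natCast]
    by_cases hse : setEq (cur.getD k1 []) s = true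
    · rw [if_pos hse]
      exact foldl_stepA_noop s cur _ (fun j hj => by
        rcases eq_or_ne j k1 with rfl | hjne
        · exact stepA_continue s cur j (by rw [setEq_comm]; exact hse)
        · exact stepA_noop s cur j (huniq j (List.mem_range.1 hj) hjne))
    · rw [if_neg hse]
      have hnoteq : setEq s (cur.getD k1 []) = false := by
        rw [setEq_comm, Bool.eq_false_iff]; exact hse
      exact foldl_stepA_update s cur k1 hk1.1
        (stepA_update s cur k1 hk1.2 hnoteq
          (isNoIntersect_of_unique s cur k1 hk1.1 hk1.2 huniq)) huniq
  · -- at least two hits: every step is a no-op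
    have hk1 : k1 < cur.length ∧ hitP s (cur.getD k1 []) = true :=
      (mem_hitsN s cur k1).1 (by rw [hH]; exact List.mem_cons_self)
    have hk2 : k2 < cur.length ∧ hitP s (cur.getD k2 []) = true :=
      (mem_hitsN s cur k2).1 (by rw [hH]; exact List.mem_cons_of_mem _ List.mem_cons_self)
    have hne12 : k1 ≠ k2 := by
      have hnd := nodup_hitsN s cur
      rw [hH] at hnd
      intro h
      exact (List.nodup_cons.1 hnd).1 (h ▸ List.mem_cons_self)
    rw [hitsB_eq s cur, hH]
    exact foldl_stepA_noop s cur _ (fun j hj => by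
      by_cases hhj : hitP s (cur.getD j []) = true
      · by_cases hse : setEq s (cur.getD j []) = true
        · exact stepA_continue s cur j hse
        · unfold stepA
          rw [if_neg hse, if_neg (by
            rw [isNoIntersect_false_of_two s cur j k1 k2 (List.mem_range.1 hj)
              hk1.1 hk2.1 hne12 hk1.2 hk2.2]
            simp)]
      · exact stepA_noop s cur j (by rw [Bool.not_eq_true] at hhj; exact hhj))

-- ===== VERDICT (by name: the statement is the Claim_ definition above) =====
theorem excludingPhase_spec : Claim_equal_excludingPhase := by
  intro disjointSets numberOfPartners allSets hdom
  clear hdom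
  unfold Spec_excludingPhase excludingPhase excludingPhase_alt
  induction allSets generalizing disjointSets with
  | nil => rfl
  | cons s rest ih =>
    simp only [List.foldl_cons]
    rw [show (List.range disjointSets.length).foldl
          (fun cur index =>
            let compareSets := removeFirstSet cur (cur.getD index [])
            if setEq s (cur.getD index []) then cur
            else if ((interSet s (cur.getD index [])).length ≠ 0 && isNoIntersectOtherwise compareSets s : Bool) then
              cur.set index (interSet s (cur.getD index []))
            else cur) disjointSets
        = (List.range disjointSets.length).foldl (stepA s) disjointSets from rfl,
      inner_eq s disjointSets]
    exact ih _
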